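-- pv_equiv track=rewrite | github.com/DeadOwwl/uni | 4 sem/algorithms & data structures/grafs py + java/a.py | time_finding
-- ===== SOURCE A (Python) =====
-- def time_finding(n, dominoes):
--     bfs_queue = []
--     checked_vertexes = 0
--     for k in range(n):
--         visited = [False if q != k else True for q in range(n)]
--         bfs_queue.insert(0, k)
--         while len(bfs_queue) != 0:
--             checking_current_vertex = bfs_queue.pop()
--             for adjacent_vertex in dominoes[checking_current_vertex]:
--                 if not visited[adjacent_vertex]:
--                     bfs_queue.insert(0, adjacent_vertex)
--                     checked_vertexes += 1
--                     visited[adjacent_vertex] = True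
--     return checked_vertexes
-- ===== SOURCE B (Python) =====
-- def time_finding(n, dominoes):
--     total = 0
--     for k in range(n):
--         visited = [q == k for q in range(n)]
--         for _ in range(n):
--             for i in range(n):
--                 if visited[i]:
--                     for v in dominoes[i]:
--                         visited[v] = True
--         total += sum(visited) - 1
--     return total
-- ===== Notes on version B (the rewrite author's own statement) =====
-- stated objective: alternative
-- what changed: Per-source BFS with an explicit FIFO queue and an incremental counter is replaced by per-source dense fixpoint iteration: n relaxation sweeps over all vertices saturate a visited array, which is counted at the end.
-- outside the precondition, e.g. on time_finding(3, [[-1], [], [], [1]]): A returns 2, B returns 1; on time_finding(1, [[0], [0]]): A returns 0, B returns 0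
import Mathlib
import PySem

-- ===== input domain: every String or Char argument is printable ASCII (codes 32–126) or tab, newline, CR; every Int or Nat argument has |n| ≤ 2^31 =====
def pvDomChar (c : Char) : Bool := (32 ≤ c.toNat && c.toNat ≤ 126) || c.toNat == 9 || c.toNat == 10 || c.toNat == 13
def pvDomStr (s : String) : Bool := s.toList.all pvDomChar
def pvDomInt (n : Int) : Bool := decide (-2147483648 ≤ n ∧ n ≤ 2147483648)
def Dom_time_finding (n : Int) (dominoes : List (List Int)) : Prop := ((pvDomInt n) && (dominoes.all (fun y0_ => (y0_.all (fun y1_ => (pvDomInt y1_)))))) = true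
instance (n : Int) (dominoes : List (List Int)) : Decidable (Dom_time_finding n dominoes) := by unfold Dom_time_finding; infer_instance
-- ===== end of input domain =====

-- B replaces A's per-source BFS worklist (queue, incremental counter) by n rounds of dense
-- relaxation sweeps per source and counts the visited list at the end: a different algorithm
-- of similar purpose ("alternative", not claimed faster).

-- ===== PORT A =====
-- body of "for adjacent_vertex in dominoes[checking_current_vertex]: ..."
def tfVisit (st : List Int × List Bool × Int) (adjacent_vertex : Int) : List Int × List Bool × Int :=
  match st with
  | (bfs_queue, visited, checked) =>
    if PySem.List.pyGetD visited adjacent_vertex true = false then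
      (PySem.List.insert bfs_queue 0 adjacent_vertex,
       PySem.List.pySetD visited adjacent_vertex true,
       checked + 1)
    else (bfs_queue, visited, checked)

-- "while len(bfs_queue) != 0: ..."; the fuel only bounds the iteration count (the loop
-- terminates within queue-length + n pops inside Pre_), it changes no computation.
def tfWhile (dominoes : List (List Int)) : Nat → List Int × List Bool × Int → List Int × List Bool × Int
  | 0, st => st
  | fuel+1, (bfs_queue, visited, checked) =>
    if bfs_queue.length ≠ 0 then
      match PySem.List.pop? bfs_queue (-1) with
      | some (cur, rest) =>
          tfWhile dominoes fuel
            ((PySem.List.pyGetD dominoes cur []).foldl tfVisit (rest, visited, checked))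
      | none => (bfs_queue, visited, checked)
    else (bfs_queue, visited, checked)

def time_finding (n : Int) (dominoes : List (List Int)) : Int :=
  ((PySem.List.pyRange 0 n 1).foldl (fun (st : List Int × Int) k =>
      let visited := (PySem.List.pyRange 0 n 1).map (fun q => if q ≠ k then false else true)
      let bfs_queue := PySem.List.insert st.1 0 k
      let r := tfWhile dominoes (bfs_queue.length + dominoes.length) (bfs_queue, visited, st.2)
      (r.1, r.2.2)) ([], 0)).2

-- ===== PORT B =====
def time_finding_alt (n : Int) (dominoes : List (List Int)) : Int :=
  (PySem.List.pyRange 0 n 1).foldl (fun total k =>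
    let visited0 := (PySem.List.pyRange 0 n 1).map (fun q => decide (q = k))
    let visited := (PySem.List.pyRange 0 n 1).foldl (fun vis _ =>
        (PySem.List.pyRange 0 n 1).foldl (fun vis i =>
          if PySem.List.pyGetD vis i false = true then
            (PySem.List.pyGetD dominoes i []).foldl (fun vis v => PySem.List.pySetD vis v true) vis
          else vis) vis) visited0
    total + ((visited.count true : Int) - 1)) 0

-- ===== PRECONDITION & SPEC =====
-- Pre_ excludes inputs where A raises (fewer than n rows, or an adjacency entry outside
-- [-n, n) indexing `visited`), and inputs with MORE than n rows, on which A's negative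
-- entries wrap inconsistently (mod n into `visited` but mod len(dominoes) into `dominoes`),
-- an accident of A's indexing; the natural adjacency-list shape has exactly n rows.
def Pre_time_finding (n : Int) (dominoes : List (List Int)) : Prop :=
  n ≤ 0 ∨ ((dominoes.length : Int) = n ∧ ∀ l ∈ dominoes, ∀ v ∈ l, -n ≤ v ∧ v < n)
instance (n : Int) (dominoes : List (List Int)) : Decidable (Pre_time_finding n dominoes) := by
  unfold Pre_time_finding; infer_instance

def pvWitness_time_finding : Int × List (List Int) := (3, [[1, -1], [2], [0]])

def Spec_time_finding (n : Int) (dominoes : List (List Int)) (out : Int) : Prop := out = time_finding_alt n dominoes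
instance (n : Int) (dominoes : List (List Int)) (out : Int) : Decidable (Spec_time_finding n dominoes out) := by unfold Spec_time_finding; infer_instance

-- ===== CLAIM (what is proved, stated in full; the proofs are below) =====
def Claim_equal_time_finding : Prop := ∀ (n : Int) (dominoes : List (List Int)), Dom_time_finding n dominoes → Pre_time_finding n dominoes → Spec_time_finding n dominoes (time_finding n dominoes)

-- ===== LEMMAS AND PROOFS =====

-- the `visited` index a possibly negative Python index v refers to (length N, -N ≤ v < N)
def tgtN (N : ℕ) (v : Int) : ℕ := (if v < 0 then v + N else v).toNat

def InR (N : ℕ) (v : Int) : Prop := -(N : Int) ≤ v ∧ v < (N : Int)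

def memv (vis : List Bool) (i : ℕ) : Prop := vis.getD i false = true

-- a predicate closed under the (normalized) edges of g
def ClosedP (g : List (List Int)) (C : ℕ → Prop) : Prop :=
  ∀ i, i < g.length → C i → ∀ v ∈ g.getD i [], C (tgtN g.length v)

-- B's innermost loop: mark every target of `row`
def bMark (vis : List Bool) (row : List Int) : List Bool :=
  row.foldl (fun vis v => PySem.List.pySetD vis v true) vis

-- one of B's sweeps over all vertices
def sweepB (g : List (List Int)) (n : Int) (vis : List Bool) : List Bool :=
  (PySem.List.pyRange 0 n 1).foldl (fun vis i =>
    if PySem.List.pyGetD vis i false = true then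
      (PySem.List.pyGetD g i []).foldl (fun vis v => PySem.List.pySetD vis v true) vis
    else vis) vis

lemma tgtN_lt {N : ℕ} {v : Int} (h : InR N v) : tgtN N v < N := by
  rcases h with ⟨h1, h2⟩; unfold tgtN; split <;> omega

lemma pyIdx_tgt {N : ℕ} {v : Int} (h : InR N v) :
    PySem.List.pyIdx? N v = some (tgtN N v) := by
  rcases h with ⟨h1, h2⟩
  simp only [PySem.List.pyIdx?]
  split_ifs with hv
  · unfold tgtN; rw [if_neg (by omega : ¬ v < 0)]
  · unfold tgtN; rw [if_pos (by omega : v < 0)]; congr 1; omega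

lemma pyGetD_tgt {α : Type} (xs : List α) (v : Int) (d : α) (h : InR xs.length v) :
    PySem.List.pyGetD xs v d = xs.getD (tgtN xs.length v) d := by
  simp [PySem.List.pyGetD, PySem.List.pyGet?, pyIdx_tgt h, List.getD_eq_getElem?_getD]

lemma pySetD_tgt (xs : List Bool) (v : Int) (b : Bool) (h : InR xs.length v) :
    PySem.List.pySetD xs v b = xs.set (tgtN xs.length v) b := by
  simp [PySem.List.pySetD, PySem.List.pySet?, pyIdx_tgt h]

lemma memv_lt {vis : List Bool} {i : ℕ} (h : memv vis i) : i < vis.length := by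
  by_contra hc
  simp [memv, List.getD_eq_getElem?_getD, List.getElem?_eq_none (by omega : vis.length ≤ i)] at h

lemma memv_iff_getElem {vis : List Bool} {t : ℕ} (h : t < vis.length) :
    memv vis t ↔ vis[t] = true := by
  simp [memv, List.getD_eq_getElem?_getD, List.getElem?_eq_getElem h]

lemma memv_set {vis : List Bool} {j i : ℕ} (hj : j < vis.length) :
    memv (vis.set j true) i ↔ (i = j ∨ memv vis i) := by
  by_cases hij : i = j
  · subst hij
    simp [memv, List.getD_eq_getElem?_getD, hj]
  · simp [memv, List.getD_eq_getElem?_getD, List.getElem?_set_ne (by omega : j ≠ i), hij]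

lemma set_self_of_memv {vis : List Bool} {j : ℕ} (h : memv vis j) : vis.set j true = vis := by
  have hj := memv_lt h
  apply List.ext_getElem (by simp)
  intro i h1 h2
  by_cases hij : i = j
  · subst hij; simp [(memv_iff_getElem hj).mp h]
  · simp [List.getElem_set_ne (by omega : j ≠ i)]

lemma count_set_true {vis : List Bool} {j : ℕ} (hj : j < vis.length) :
    (vis.set j true).count true = vis.count true + (if vis.getD j false = true then 0 else 1) := by
  induction vis generalizing j with
  | nil => simp at hj
  | cons a l ih =>
    cases j with
    | zero => cases a <;> simp
    | succ m =>
      simp only [List.set_cons_succ, List.count_cons, List.getD_cons_succ]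
      rw [ih (by simpa using hj)]
      ring

lemma sub_tail {a b : List Bool} {x y : Bool} (h : ∀ i, memv (x :: a) i → memv (y :: b) i) :
    ∀ i, memv a i → memv b i := by
  intro i hi
  have := h (i+1)
  simp only [memv, List.getD_cons_succ] at this
  exact this hi

lemma count_le_of_sub {a b : List Bool} (hlen : a.length = b.length)
    (hsub : ∀ i, memv a i → memv b i) : a.count true ≤ b.count true := by
  induction a generalizing b with
  | nil => cases b <;> simp_all
  | cons x xs ih =>
    cases b with
    | nil => simp at hlen
    | cons y ys =>
      have h0 := hsub 0
      simp only [memv, List.getD_cons_zero] at h0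
      have := ih (by simpa using hlen) (sub_tail hsub)
      cases x
      · cases y <;> simp <;> omega
      · rw [h0 rfl]; simp; omega

lemma count_lt_of_sub_ne {a b : List Bool} (hlen : a.length = b.length)
    (hsub : ∀ i, memv a i → memv b i) (hne : a ≠ b) : a.count true < b.count true := by
  induction a generalizing b with
  | nil => cases b <;> simp_all
  | cons x xs ih =>
    cases b with
    | nil => simp at hlen
    | cons y ys =>
      have h0 := hsub 0
      simp only [memv, List.getD_cons_zero] at h0
      have hlen' : xs.length = ys.length := by simpa using hlen
      have htl := sub_tail hsub
      by_cases hxy : x = y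
      · subst hxy
        have : xs ≠ ys := by intro h; exact hne (by rw [h])
        have := ih hlen' htl this
        cases x <;> simp <;> omega
      · have hx : x = false := by
          cases x
          · rfl
          · exact absurd (h0 rfl).symm hxy
        subst hx
        have hy : y = true := by revert hxy; cases y <;> simp
        subst hy
        have := count_le_of_sub hlen' htl
        simp; omega

lemma eq_of_sub_sub {a b : List Bool} (hlen : a.length = b.length)
    (h1 : ∀ i, memv a i → memv b i) (h2 : ∀ i, memv b i → memv a i) : a = b := by
  by_contra hne
  have g1 := count_lt_of_sub_ne hlen h1 hne
  have g2 := count_le_of_sub hlen.symm h2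
  omega

lemma count_le_len (a : List Bool) : a.count true ≤ a.length := List.count_le_length

lemma condA {N : ℕ} {vis : List Bool} {v : Int} (hlen : vis.length = N) (h : InR N v) :
    (PySem.List.pyGetD vis v true = false) ↔ ¬ memv vis (tgtN N v) := by
  subst hlen
  have ht := tgtN_lt h
  rw [pyGetD_tgt vis v true h]
  rw [List.getD_eq_getElem _ _ ht]
  rw [memv_iff_getElem ht]
  cases vis[tgtN vis.length v] <;> simp

-- ---- A's inner for-loop over one adjacency row ----
lemma markA_spec (N : ℕ) (row : List Int) (hrowR : ∀ v ∈ row, InR N v) :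
    ∀ (q : List Int) (vis : List Bool) (c : Int), vis.length = N →
    ∃ p vis',
      row.foldl tfVisit (q, vis, c)
        = (p ++ q, vis', c + ((vis'.count true : Int) - (vis.count true : Int))) ∧
      vis' = bMark vis row ∧
      vis'.length = N ∧
      (∀ x ∈ p, x ∈ row) ∧
      (p.length + vis.count true = vis'.count true) ∧
      (∀ i, memv vis i → memv vis' i) ∧
      (∀ i, memv vis' i → memv vis i ∨ ∃ x ∈ p, tgtN N x = i) ∧
      (∀ v ∈ row, memv vis' (tgtN N v)) := by
  induction row with
  | nil =>
    intro q vis c hlen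
    exact ⟨[], vis, by simp, rfl, hlen, by simp, by simp, fun i h => h,
      fun i h => Or.inl h, by simp⟩
  | cons v rest ih =>
    intro q vis c hlen
    have hv : InR N v := hrowR v (by simp)
    have hvV : InR vis.length v := by rw [hlen]; exact hv
    have ht : tgtN N v < N := tgtN_lt hv
    have hrest : ∀ w ∈ rest, InR N w := fun w hw => hrowR w (by simp [hw])
    simp only [List.foldl_cons, bMark, tfVisit]
    by_cases hmem : memv vis (tgtN N v)
    · rw [if_neg (by rw [condA hlen hv]; simpa using hmem)]
      have hset : PySem.List.pySetD vis v true = vis := by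
        rw [pySetD_tgt vis v true hvV, hlen]; exact set_self_of_memv hmem
      rw [hset]
      obtain ⟨p, vis', h1, h2, h3, h4, h5, h6, h7, h8⟩ := ih hrest q vis c hlen
      refine ⟨p, vis', h1, h2, h3, fun x hx => by simp [h4 x hx],
        h5, h6, fun i hi => (h7 i hi).imp_right (fun ⟨x, hx, htx⟩ => ⟨x, by simp [hx], htx⟩), ?_⟩
      intro w hw
      rcases List.mem_cons.mp hw with h | h
      · subst h; exact h6 _ hmem
      · exact h8 w h
    · rw [if_pos (by rw [condA hlen hv]; simpa using hmem)]
      rw [PySem.List.insert_zero]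
      rw [pySetD_tgt vis v true hvV, hlen]
      set vis1 := vis.set (tgtN N v) true with hvis1
      have hlen1 : vis1.length = N := by simp [hvis1, hlen]
      have hcnt1 : vis1.count true = vis.count true + 1 := by
        rw [hvis1, count_set_true (by omega)]
        rw [if_neg (by simpa [memv] using hmem)]
      have hmem1 : ∀ i, memv vis1 i ↔ (i = tgtN N v ∨ memv vis i) := by
        intro i; rw [hvis1]; exact memv_set (by omega)
      obtain ⟨p, vis', h1, h2, h3, h4, h5, h6, h7, h8⟩ := ih hrest (v :: q) vis1 (c + 1) hlen1
      refine ⟨p ++ [v], vis', ?_, h2, h3, ?_, ?_, ?_, ?_, ?_⟩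
      · rw [h1, hcnt1]
        simp only [Prod.mk.injEq, List.append_assoc, List.cons_append, List.nil_append,
          true_and]
        push_cast
        ring
      · intro x hx
        rcases List.mem_append.mp hx with h | h
        · simp [h4 x h]
        · simp at h; simp [h]
      · simp only [List.length_append, List.length_singleton]
        omega
      · intro i hi
        exact h6 i ((hmem1 i).mpr (Or.inr hi))
      · intro i hi
        rcases h7 i hi with h | ⟨x, hx, htx⟩
        · rcases (hmem1 i).mp h with h' | h'
          · exact Or.inr ⟨v, by simp, h'.symm ▸ rfl⟩
          · exact Or.inl h'
        · exact Or.inr ⟨x, by simp [hx], htx⟩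
      · intro w hw
        rcases List.mem_cons.mp hw with h | h
        · subst h; exact h6 _ ((hmem1 _).mpr (Or.inl rfl))
        · exact h8 w h
-- ---- the BFS while-loop ----
lemma tfWhile_spec (g : List (List Int)) (hg : ∀ l ∈ g, ∀ v ∈ l, InR g.length v) :
    ∀ (fuel : ℕ) (q : List Int) (vis : List Bool) (c : Int),
    vis.length = g.length →
    q.length + (g.length - vis.count true) ≤ fuel →
    (∀ x ∈ q, InR g.length x ∧ memv vis (tgtN g.length x)) →
    (∀ i, memv vis i → (∃ x ∈ q, tgtN g.length x = i) ∨ ∀ v ∈ g.getD i [], memv vis (tgtN g.length v)) →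
    ∃ vis',
      tfWhile g fuel (q, vis, c) = ([], vis', c + ((vis'.count true : Int) - (vis.count true : Int))) ∧
      vis'.length = g.length ∧
      (∀ i, memv vis i → memv vis' i) ∧
      (∀ i, memv vis' i → ∀ v ∈ g.getD i [], memv vis' (tgtN g.length v)) ∧
      (∀ C : ℕ → Prop, ClosedP g C → (∀ i, memv vis i → C i) → ∀ i, memv vis' i → C i) := by
  intro fuel
  induction fuel with
  | zero =>
    intro q vis c hlenv hfuel hq hP
    have hqe : q = [] := by
      cases q with
      | nil => rfl
      | cons a as => simp at hfuel
    subst hqe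
    refine ⟨vis, by simp [tfWhile], hlenv, fun i h => h, ?_, fun C _ hsub i hi => hsub i hi⟩
    intro i hi
    rcases hP i hi with ⟨x, hx, _⟩ | h
    · simp at hx
    · exact h
  | succ fuel ih =>
    intro q vis c hlenv hfuel hq hP
    by_cases hqe : q = []
    · subst hqe
      refine ⟨vis, by simp [tfWhile], hlenv, fun i h => h, ?_, fun C _ hsub i hi => hsub i hi⟩
      intro i hi
      rcases hP i hi with ⟨x, hx, _⟩ | h
      · simp at hx
      · exact h
    · obtain ⟨q0, x, hsplit⟩ : ∃ q0 x, q = q0 ++ [x] :=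
        ⟨q.dropLast, q.getLast hqe, (List.dropLast_append_getLast hqe).symm⟩
      subst hsplit
      obtain ⟨hlastR, hlastM⟩ := hq x (by simp)
      have htl : tgtN g.length x < g.length := tgtN_lt hlastR
      have hrowget : PySem.List.pyGetD g x [] = g.getD (tgtN g.length x) [] :=
        pyGetD_tgt g _ [] hlastR
      set row := g.getD (tgtN g.length x) [] with hrowdef
      have hrowmem : row ∈ g := by
        rw [hrowdef, List.getD_eq_getElem _ _ htl]
        exact List.getElem_mem htl
      have hrowR : ∀ v ∈ row, InR g.length v := fun v hv => hg row hrowmem v hv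
      have hstep : tfWhile g (fuel + 1) (q0 ++ [x], vis, c)
          = tfWhile g fuel (row.foldl tfVisit (q0, vis, c)) := by
        rw [tfWhile]
        rw [if_pos (by simp)]
        rw [PySem.List.pop?_last]
        simp only []
        rw [hrowget]
      obtain ⟨p, vis1, heq, _, hlen1, hprow, hplen, hmono1, hchar1, hrowmem1⟩ :=
        markA_spec g.length row hrowR q0 vis c hlenv
      have hcnt1le : vis1.count true ≤ g.length := hlen1 ▸ count_le_len vis1
      have hcntle : vis.count true ≤ vis1.count true := by omega
      have hql : (q0 ++ [x]).length = q0.length + 1 := by simp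
      obtain ⟨vis', hres, hlen', hmono', hclosed', hmin'⟩ :=
        ih (p ++ q0) vis1 (c + ((vis1.count true : Int) - (vis.count true : Int)))
          hlen1
          (by simp only [List.length_append] at *; omega)
          (by
            intro y hy
            rcases List.mem_append.mp hy with h | h
            · exact ⟨hrowR y (hprow y h), hrowmem1 y (hprow y h)⟩
            · obtain ⟨h1, h2⟩ := hq y (by simp [h])
              exact ⟨h1, hmono1 _ h2⟩)
          (by
            intro i hi
            rcases hchar1 i hi with hvi | ⟨y, hy, hty⟩
            · rcases hP i hvi with ⟨y, hy, hty⟩ | hcl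
              · rcases List.mem_append.mp hy with h | h
                · exact Or.inl ⟨y, List.mem_append_right p h, hty⟩
                · simp only [List.mem_singleton] at h
                  subst h
                  refine Or.inr ?_
                  rw [← hty]
                  exact fun v hv => hrowmem1 v hv
              · exact Or.inr fun v hv => hmono1 _ (hcl v hv)
            · exact Or.inl ⟨y, List.mem_append_left _ hy, hty⟩)
      refine ⟨vis', ?_, hlen', fun i hi => hmono' i (hmono1 i hi), hclosed', ?_⟩
      · rw [hstep, heq, hres]
        simp only [Prod.mk.injEq, true_and]
        ring
      · intro C hC hsub i hi
        refine hmin' C hC ?_ i hi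
        intro j hj
        rcases hchar1 j hj with h | ⟨y, hy, hty⟩
        · exact hsub j h
        · rw [← hty]
          exact hC _ htl (hsub _ hlastM) y (hprow y hy)

-- ---- B's sweep ----
lemma bMark_spec (N : ℕ) (row : List Int) (hrowR : ∀ v ∈ row, InR N v)
    (vis : List Bool) (hlen : vis.length = N) :
    (bMark vis row).length = N ∧
    (∀ i, memv vis i → memv (bMark vis row) i) ∧
    (∀ v ∈ row, memv (bMark vis row) (tgtN N v)) ∧
    (∀ i, memv (bMark vis row) i → memv vis i ∨ ∃ v ∈ row, tgtN N v = i) := by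
  obtain ⟨p, vis', _, h2, h3, h4, _, h6, h7, h8⟩ := markA_spec N row hrowR [] vis 0 hlen
  subst h2
  exact ⟨h3, h6, h8, fun i hi => (h7 i hi).imp_right (fun ⟨x, hx, htx⟩ => ⟨x, h4 x hx, htx⟩)⟩

-- B's middle loop, abstracted to a fold over a list of Nat indices
def natSweep (g : List (List Int)) (is : List ℕ) (vis : List Bool) : List Bool :=
  is.foldl (fun vis i => if vis.getD i false = true then bMark vis (g.getD i []) else vis) vis

lemma natSweep_spec (g : List (List Int)) (hg : ∀ l ∈ g, ∀ v ∈ l, InR g.length v) :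
    ∀ (is : List ℕ) (vis : List Bool), vis.length = g.length →
    (natSweep g is vis).length = g.length ∧
    (∀ j, memv vis j → memv (natSweep g is vis) j) ∧
    (∀ i ∈ is, memv vis i → ∀ v ∈ g.getD i [], memv (natSweep g is vis) (tgtN g.length v)) ∧
    (∀ C : ℕ → Prop, ClosedP g C → (∀ j, memv vis j → C j) → ∀ j, memv (natSweep g is vis) j → C j) := by
  intro is
  induction is with
  | nil => exact fun vis hlen => ⟨hlen, fun j h => h, by simp, fun C _ hsub j hj => hsub j hj⟩
  | cons i rest ih =>
    intro vis hlen
    simp only [natSweep, List.foldl_cons]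
    by_cases hmi : vis.getD i false = true
    · rw [if_pos hmi]
      have hiN : i < g.length := hlen ▸ memv_lt hmi
      have hrowmem : g.getD i [] ∈ g := by
        rw [List.getD_eq_getElem _ _ hiN]; exact List.getElem_mem hiN
      have hrowR : ∀ v ∈ g.getD i [], InR g.length v := fun v hv => hg _ hrowmem v hv
      obtain ⟨hb1, hb2, hb3, hb4⟩ := bMark_spec g.length (g.getD i []) hrowR vis hlen
      obtain ⟨hl, hmono, hmarks, hmin⟩ := ih (bMark vis (g.getD i [])) hb1
      refine ⟨hl, fun j hj => hmono j (hb2 j hj), ?_, ?_⟩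
      · intro i' hi' hmi' v hv
        rcases List.mem_cons.mp hi' with h | h
        · subst h; exact hmono _ (hb3 v hv)
        · exact hmarks i' h (hb2 _ hmi') v hv
      · intro C hC hsub j hj
        refine hmin C hC ?_ j hj
        intro j' hj'
        rcases hb4 j' hj' with h | ⟨v, hv, htv⟩
        · exact hsub j' h
        · rw [← htv]; exact hC i hiN (hsub i hmi) v hv
    · rw [if_neg hmi]
      obtain ⟨hl, hmono, hmarks, hmin⟩ := ih vis hlen
      refine ⟨hl, hmono, ?_, hmin⟩
      intro i' hi' hmi' v hv
      rcases List.mem_cons.mp hi' with h | h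
      · subst h; exact absurd hmi' hmi
      · exact hmarks i' h hmi' v hv

lemma sweepB_eq_natSweep (g : List (List Int)) (n : Int) (hn : n = (g.length : Int))
    (vis : List Bool) : sweepB g n vis = natSweep g (List.range g.length) vis := by
  subst hn
  simp only [sweepB, natSweep, PySem.List.pyRange_zero_nat, List.foldl_map]
  congr 1
  funext vis i
  simp [bMark]

lemma all_memv_of_count_eq {vis : List Bool} (h : vis.count true = vis.length) :
    ∀ i, i < vis.length → memv vis i := by
  intro i hi
  rw [memv_iff_getElem hi]
  have := (List.count_eq_length (a := true) (l := vis)).mp h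
  exact (this vis[i] (List.getElem_mem hi)).symm

lemma iterB_spec (g : List (List Int)) (hg : ∀ l ∈ g, ∀ v ∈ l, InR g.length v)
    (n : Int) (hn : n = (g.length : Int)) :
    ∀ (m : ℕ) (vis : List Bool), vis.length = g.length →
    g.length ≤ m + vis.count true →
    ((sweepB g n)^[m] vis).length = g.length ∧
    (∀ i, memv vis i → memv ((sweepB g n)^[m] vis) i) ∧
    (∀ i, memv ((sweepB g n)^[m] vis) i → ∀ v ∈ g.getD i [], memv ((sweepB g n)^[m] vis) (tgtN g.length v)) ∧
    (∀ C : ℕ → Prop, ClosedP g C → (∀ i, memv vis i → C i) → ∀ i, memv ((sweepB g n)^[m] vis) i → C i) := by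
  intro m
  induction m with
  | zero =>
    intro vis hlen hcnt
    simp only [Function.iterate_zero, id]
    have hall : ∀ i, i < vis.length → memv vis i :=
      all_memv_of_count_eq (by have := count_le_len vis; omega)
    refine ⟨hlen, fun i h => h, ?_, fun C _ hsub i hi => hsub i hi⟩
    intro i hi v hv
    have hiN : i < g.length := hlen ▸ memv_lt hi
    have hrowmem : g.getD i [] ∈ g := by
      rw [List.getD_eq_getElem _ _ hiN]; exact List.getElem_mem hiN
    have := tgtN_lt (hg _ hrowmem v hv)
    exact hall _ (by omega)
  | succ m ih =>
    intro vis hlen hcnt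
    have hsw := sweepB_eq_natSweep g n hn vis
    obtain ⟨hs1, hs2, hs3, hs4⟩ := natSweep_spec g hg (List.range g.length) vis hlen
    rw [← hsw] at hs1 hs2 hs3 hs4
    by_cases hfix : sweepB g n vis = vis
    · have hit : (sweepB g n)^[m] vis = vis := Function.iterate_fixed hfix m
      rw [Function.iterate_succ_apply, hfix, hit]
      have hclosed : ∀ i, memv vis i → ∀ v ∈ g.getD i [], memv vis (tgtN g.length v) := by
        intro i hi v hv
        have := hs3 i (List.mem_range.mpr (hlen ▸ memv_lt hi)) hi v hv
        rwa [hfix] at this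
      exact ⟨hlen, fun i h => h, hclosed, fun C _ hsub i hi => hsub i hi⟩
    · have hcnt' : vis.count true < (sweepB g n vis).count true :=
        count_lt_of_sub_ne (by omega) hs2 (fun h => hfix h.symm)
      obtain ⟨hi1, hi2, hi3, hi4⟩ := ih (sweepB g n vis) hs1 (by omega)
      rw [Function.iterate_succ_apply]
      exact ⟨hi1, fun i hi => hi2 i (hs2 i hi), hi3,
        fun C hC hsub i hi => hi4 C hC (fun j hj => hs4 C hC hsub j hj) i hi⟩

lemma foldl_const {α β : Type} (l : List β) (f : α → α) (init : α) :
    l.foldl (fun acc _ => f acc) init = f^[l.length] init := by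
  induction l generalizing init with
  | nil => rfl
  | cons x xs ih => simp [List.foldl_cons, ih, Function.iterate_succ_apply]

lemma vis0_eq (n k : Int) (N : ℕ) (hn : (N : Int) = n) (hk0 : 0 ≤ k) :
    (PySem.List.pyRange 0 n 1).map (fun q => decide (q = k))
      = (List.range N).map (fun q => decide (q = k.toNat)) := by
  rw [← hn, PySem.List.pyRange_zero_nat, List.map_map]
  apply List.map_congr_left
  intro q _
  simp only [Function.comp_apply]
  exact decide_eq_decide.mpr (by omega)

lemma count_one_range (N kN : ℕ) (hk : kN < N) :
    ((List.range N).map (fun q => decide (q = kN))).count true = 1 := by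
  induction N with
  | zero => omega
  | succ m ih =>
    rw [List.range_succ, List.map_append, List.count_append]
    by_cases hkm : kN = m
    · subst hkm
      have : ∀ q ∈ List.range kN, decide (q = kN) = false := by
        intro q hq
        simp only [decide_eq_false_iff_not]
        have := List.mem_range.mp hq
        omega
      rw [List.count_eq_zero_of_not_mem]
      · simp
      · intro hmem
        obtain ⟨q, hq, hdq⟩ := List.mem_map.mp hmem
        rw [this q hq] at hdq
        exact Bool.false_ne_true hdq
    · rw [ih (by omega)]
      simp [show m ≠ kN from fun h => hkm h.symm]

lemma memv0_iff (N kN : ℕ) (hk : kN < N) (i : ℕ) :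
    memv ((List.range N).map (fun q => decide (q = kN))) i ↔ i = kN := by
  constructor
  · intro h
    have hi : i < N := by
      have := memv_lt h
      simpa using this
    rw [memv, PySem.List.getD_map_range _ _ _ _ hi] at h
    simpa using h
  · intro h
    subst h
    rw [memv, PySem.List.getD_map_range _ _ _ _ hk]
    simp

lemma source_step (g : List (List Int)) (hg : ∀ l ∈ g, ∀ v ∈ l, InR g.length v)
    (n : Int) (hn : (g.length : Int) = n) (k : Int) (hk0 : 0 ≤ k) (hkn : k < n) (t : Int) :
    ∃ c' : Int,
      (let visited := (PySem.List.pyRange 0 n 1).map (fun q => if q ≠ k then false else true)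
       let bfs_queue := PySem.List.insert ([] : List Int) 0 k
       let r := tfWhile g (bfs_queue.length + g.length) (bfs_queue, visited, t)
       ((r.1, r.2.2) : List Int × Int)) = (([] : List Int), t + c') ∧
      (let visited0 := (PySem.List.pyRange 0 n 1).map (fun q => decide (q = k))
       let visited := (PySem.List.pyRange 0 n 1).foldl (fun vis _ => sweepB g n vis) visited0
       t + ((visited.count true : Int) - 1)) = t + c' := by
  have hkN : k.toNat < g.length := by omega
  have hAB0 : (PySem.List.pyRange 0 n 1).map (fun q => if q ≠ k then false else true)
      = (PySem.List.pyRange 0 n 1).map (fun q => decide (q = k)) := by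
    apply List.map_congr_left
    intro q _
    by_cases hq : q = k <;> simp [hq]
  have hv0 := vis0_eq n k g.length hn hk0
  set vis0 := (PySem.List.pyRange 0 n 1).map (fun q => decide (q = k)) with hvis0def
  have hlen0 : vis0.length = g.length := by rw [hv0]; simp
  have hcnt0 : vis0.count true = 1 := by rw [hv0]; exact count_one_range _ _ hkN
  have hmemv0 : ∀ i, memv vis0 i ↔ i = k.toNat := by
    intro i; rw [hv0]; exact memv0_iff _ _ hkN i
  have htgtk : tgtN g.length k = k.toNat := by
    unfold tgtN; rw [if_neg (by omega)]
  obtain ⟨visA, hresA, hlenA, hmonoA, hclosedA, hminA⟩ :=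
    tfWhile_spec g hg (1 + g.length) [k] vis0 t hlen0
      (by simp only [List.length_singleton]; omega)
      (by
        intro x hx
        simp only [List.mem_singleton] at hx
        subst hx
        refine ⟨⟨by omega, by omega⟩, ?_⟩
        rw [htgtk, hmemv0]
        )
      (by
        intro i hi
        exact Or.inl ⟨k, by simp, by rw [htgtk]; exact ((hmemv0 i).mp hi).symm⟩)
  have hlenrange : (PySem.List.pyRange 0 n 1).length = g.length := by
    rw [← hn, PySem.List.pyRange_zero_nat]; simp
  obtain ⟨hlenB, hmonoB, hclosedB, hminB⟩ :=
    iterB_spec g hg n hn.symm g.length vis0 hlen0 (by omega)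
  set visB := (sweepB g n)^[g.length] vis0 with hvisBdef
  have hAeqB : visA = visB := by
    apply eq_of_sub_sub (by omega)
    · exact hminA (fun i => memv visB i) (fun i _ hi v hv => hclosedB i hi v hv) hmonoB
    · exact hminB (fun i => memv visA i) (fun i _ hi v hv => hclosedA i hi v hv) hmonoA
  refine ⟨(visA.count true : Int) - 1, ?_, ?_⟩
  · simp only []
    rw [PySem.List.insert_zero]
    have : ([k] : List Int).length + g.length = 1 + g.length := by simp
    rw [hAB0, this, hresA, hcnt0]
    simp
  · simp only []
    rw [foldl_const, hlenrange, ← hvisBdef, ← hAeqB]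

lemma outer_spec (g : List (List Int)) (hg : ∀ l ∈ g, ∀ v ∈ l, InR g.length v)
    (n : Int) (hn : (g.length : Int) = n) :
    ∀ (ks : List Int), (∀ k ∈ ks, 0 ≤ k ∧ k < n) → ∀ (t : Int),
    (ks.foldl (fun (st : List Int × Int) k =>
        let visited := (PySem.List.pyRange 0 n 1).map (fun q => if q ≠ k then false else true)
        let bfs_queue := PySem.List.insert st.1 0 k
        let r := tfWhile g (bfs_queue.length + g.length) (bfs_queue, visited, st.2)
        ((r.1, r.2.2) : List Int × Int)) ([], t))
    = ([], ks.foldl (fun total k =>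
        let visited0 := (PySem.List.pyRange 0 n 1).map (fun q => decide (q = k))
        let visited := (PySem.List.pyRange 0 n 1).foldl (fun vis _ => sweepB g n vis) visited0
        total + ((visited.count true : Int) - 1)) t) := by
  intro ks
  induction ks with
  | nil => intro _ t; rfl
  | cons k rest ih =>
    intro hks t
    obtain ⟨hk0, hkn⟩ := hks k (by simp)
    obtain ⟨c', hA, hB⟩ := source_step g hg n hn k hk0 hkn t
    simp only [List.foldl_cons]
    rw [hA, hB]
    exact ih (fun k' hk' => hks k' (by simp [hk'])) (t + c')

-- ===== VERDICT (by name: the statement is the Claim_ definition above) =====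
theorem time_finding_spec : Claim_equal_time_finding := by
  intro n dominoes _ hpre
  unfold Spec_time_finding time_finding time_finding_alt
  rcases hpre with hle | ⟨hlen, hent⟩
  · rw [PySem.List.pyRange_one_eq_nil hle]
    rfl
  · have hg : ∀ l ∈ dominoes, ∀ v ∈ l, InR dominoes.length v := by
      intro l hl v hv
      obtain ⟨h1, h2⟩ := hent l hl v hv
      exact ⟨by omega, by omega⟩
    have houter := outer_spec dominoes hg n hlen (PySem.List.pyRange 0 n 1)
      (fun k hk => by
        have := PySem.List.mem_pyRange_one.mp hk
        exact ⟨this.1, this.2⟩) 0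
    rw [houter]
    rfl
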